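-- pv_equiv track=rewrite | github.com/Ahmet571-es/psiko-test-uygulamasi | aile_bilgilendirme.py | get_available_topics
-- ===== SOURCE A (Python) =====
-- ALL_TOPICS = [
--     "Genel Degerlendirme",
--     "Ogrenme Stili ve Tercihleri",
--     "Guclu Yonler",
--     "Gelisim Alanlari",
--     "Motivasyon ve Ilgi Alanlari",
--     "Calisma Aliskanliklari",
--     "Sinav Kaygisi Durumu",
--     "Dikkat ve Odaklanma",
--     "Sosyal-Duygusal Gelisim",
--     "Kariyer Yonelimleri",
--     "Evde Yapilabilecek Destekler",
--     "Profesyonel Destek Onerileri",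
-- ]
--
-- ALWAYS_ACTIVE = {
--     "Genel Degerlendirme",
--     "Guclu Yonler",
--     "Gelisim Alanlari",
--     "Evde Yapilabilecek Destekler",
--     "Profesyonel Destek Onerileri",
--     "Motivasyon ve Ilgi Alanlari",
--     "Sosyal-Duygusal Gelisim",
-- }
--
-- TOPIC_TEST_MAP = {
--     "Sinav Kaygisi Durumu": ["Sinav Kaygisi Olcegi"],
--     "Dikkat ve Odaklanma": ["P2 Dikkat Testi"],
--     "Kariyer Yonelimleri": ["Holland Mesleki Ilgi Envanteri"],
--     "Ogrenme Stili ve Tercihleri": [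
--         "VARK Ogrenme Stilleri Testi",
--         "Coklu Zeka Testi",
--         "Sag-Sol Beyin Dominansi Testi",
--     ],
--     "Calisma Aliskanliklari": ["Calisma Davranisi Olcegi"],
-- }
--
-- def get_available_topics(test_names):
--     """
--     Yapilan testlere gore aktif konu basliklarini belirler.
--     Donus: [(baslik, aktif_mi), ...]
--     """
--     result = []
--     for topic in ALL_TOPICS:
--         if topic in ALWAYS_ACTIVE:
--             result.append((topic, True))
--         elif topic in TOPIC_TEST_MAP:
--             required_tests = TOPIC_TEST_MAP[topic]
--             is_active = any(
--                 _test_name_matches(t, required_tests) for t in test_names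
--             )
--             result.append((topic, is_active))
--         else:
--             result.append((topic, True))
--     return result
--
-- def _test_name_matches(test_name, required_list):
--     """Test adinin gerekli listede olup olmadigini esnek sekilde kontrol eder."""
--     test_lower = test_name.lower()
--     for req in required_list:
--         req_lower = req.lower()
--         # Tam eslesme veya icerik eslesmesi
--         if req_lower in test_lower or test_lower in req_lower:
--             return True
--         # Anahtar kelime eslesmesi
--         req_words = req_lower.split()
--         if all(w in test_lower for w in req_words if len(w) > 3):
--             return True
--     return False
-- ===== SOURCE B (Python) =====
-- # Table-driven re-implementation: one precomputed spec list merging ALL_TOPICS,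
-- # ALWAYS_ACTIVE and TOPIC_TEST_MAP (None = unconditionally active), read off by a
-- # single comprehension; the fuzzy matching is done by two small recursive helpers.
--
-- # topic -> None (always active) or the list of tests that can activate it,
-- # precomputed once from the module's three constants.
-- TOPIC_REQUIREMENTS = [
--     ("Genel Degerlendirme", None),
--     ("Ogrenme Stili ve Tercihleri", [
--         "VARK Ogrenme Stilleri Testi",
--         "Coklu Zeka Testi",
--         "Sag-Sol Beyin Dominansi Testi",
--     ]),
--     ("Guclu Yonler", None),
--     ("Gelisim Alanlari", None),
--     ("Motivasyon ve Ilgi Alanlari", None),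
--     ("Calisma Aliskanliklari", ["Calisma Davranisi Olcegi"]),
--     ("Sinav Kaygisi Durumu", ["Sinav Kaygisi Olcegi"]),
--     ("Dikkat ve Odaklanma", ["P2 Dikkat Testi"]),
--     ("Sosyal-Duygusal Gelisim", None),
--     ("Kariyer Yonelimleri", ["Holland Mesleki Ilgi Envanteri"]),
--     ("Evde Yapilabilecek Destekler", None),
--     ("Profesyonel Destek Onerileri", None),
-- ]
--
--
-- def _matches_required(low, reqs):
--     """Does the (already lowercased) test name fuzzily match any required test?"""
--     if not reqs:
--         return False
--     r = reqs[0].lower()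
--     if r in low or low in r:
--         return True
--     if not any(len(w) > 3 and w not in low for w in r.split()):
--         return True
--     return _matches_required(low, reqs[1:])
--
--
-- def _any_test_matches(names, reqs):
--     for name in names:
--         if _matches_required(name.lower(), reqs):
--             return True
--     return False
--
--
-- def get_available_topics(test_names):
--     """
--     Yapilan testlere gore aktif konu basliklarini belirler.
--     Donus: [(baslik, aktif_mi), ...]
--     """
--     return [
--         (topic, reqs is None or _any_test_matches(test_names, reqs))
--         for topic, reqs in TOPIC_REQUIREMENTS
--     ]
-- ===== Notes on version B (the rewrite author's own statement) =====
-- stated objective: alternative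
-- what changed: Replaces the per-topic branching over ALWAYS_ACTIVE/TOPIC_TEST_MAP with one precomputed spec table (topic, None-or-required-tests) read off by a single comprehension, and rewrites the fuzzy matcher as a recursive helper over the required list using a De Morgan'd word check.
import Mathlib
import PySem

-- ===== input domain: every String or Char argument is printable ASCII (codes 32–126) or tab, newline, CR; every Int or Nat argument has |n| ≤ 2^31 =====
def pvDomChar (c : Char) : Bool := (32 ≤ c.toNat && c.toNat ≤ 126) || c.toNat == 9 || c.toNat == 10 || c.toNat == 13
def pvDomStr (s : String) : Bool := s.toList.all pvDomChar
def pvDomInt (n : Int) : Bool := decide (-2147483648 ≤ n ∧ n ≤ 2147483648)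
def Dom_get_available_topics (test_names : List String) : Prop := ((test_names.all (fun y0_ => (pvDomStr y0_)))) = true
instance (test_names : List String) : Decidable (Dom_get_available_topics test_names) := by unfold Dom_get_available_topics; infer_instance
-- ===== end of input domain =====

-- B replaces A's per-topic branching over ALWAYS_ACTIVE/TOPIC_TEST_MAP by one precomputed
-- spec table (topic, None-or-required-tests) read off in a single map, with the fuzzy
-- matcher rewritten as a recursive helper (objective: alternative, same cost).

-- ===== PORT A =====
def pvALL_TOPICS : List String :=
  ["Genel Degerlendirme", "Ogrenme Stili ve Tercihleri", "Guclu Yonler",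
   "Gelisim Alanlari", "Motivasyon ve Ilgi Alanlari", "Calisma Aliskanliklari",
   "Sinav Kaygisi Durumu", "Dikkat ve Odaklanma", "Sosyal-Duygusal Gelisim",
   "Kariyer Yonelimleri", "Evde Yapilabilecek Destekler", "Profesyonel Destek Onerileri"]

def pvALWAYS_ACTIVE : PySem.Set String :=
  PySem.Set.ofList
    ["Genel Degerlendirme", "Guclu Yonler", "Gelisim Alanlari",
     "Evde Yapilabilecek Destekler", "Profesyonel Destek Onerileri",
     "Motivasyon ve Ilgi Alanlari", "Sosyal-Duygusal Gelisim"]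

def pvTOPIC_TEST_MAP : PySem.Dict String (List String) :=
  PySem.Dict.ofList
    [("Sinav Kaygisi Durumu", ["Sinav Kaygisi Olcegi"]),
     ("Dikkat ve Odaklanma", ["P2 Dikkat Testi"]),
     ("Kariyer Yonelimleri", ["Holland Mesleki Ilgi Envanteri"]),
     ("Ogrenme Stili ve Tercihleri",
       ["VARK Ogrenme Stilleri Testi", "Coklu Zeka Testi", "Sag-Sol Beyin Dominansi Testi"]),
     ("Calisma Aliskanliklari", ["Calisma Davranisi Olcegi"])]

-- A's helper _test_name_matches
def pvTestNameMatches (test_name : String) (required_list : List String) : Bool :=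
  let test_lower := PySem.Str.lower test_name
  required_list.any (fun req =>
    let req_lower := PySem.Str.lower req
    (PySem.Str.isIn req_lower test_lower || PySem.Str.isIn test_lower req_lower)
    ||
    ((PySem.Str.split₀ req_lower).all (fun w =>
        if PySem.Str.len w > 3 then PySem.Str.isIn w test_lower else true)))

def get_available_topics (test_names : List String) : List (String × Bool) :=
  pvALL_TOPICS.foldl (fun result topic =>
    if pvALWAYS_ACTIVE.contains topic then
      result ++ [(topic, true)]
    else if pvTOPIC_TEST_MAP.contains topic then
      let required_tests := pvTOPIC_TEST_MAP.getD topic []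
      result ++ [(topic, test_names.any (fun t => pvTestNameMatches t required_tests))]
    else
      result ++ [(topic, true)]) []

-- ===== PORT B =====
-- B's precomputed spec table: topic paired with none (always active) or its required tests
def pvTOPIC_REQUIREMENTS : List (String × Option (List String)) :=
  [("Genel Degerlendirme", none),
   ("Ogrenme Stili ve Tercihleri",
     some ["VARK Ogrenme Stilleri Testi", "Coklu Zeka Testi", "Sag-Sol Beyin Dominansi Testi"]),
   ("Guclu Yonler", none),
   ("Gelisim Alanlari", none),
   ("Motivasyon ve Ilgi Alanlari", none),
   ("Calisma Aliskanliklari", some ["Calisma Davranisi Olcegi"]),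
   ("Sinav Kaygisi Durumu", some ["Sinav Kaygisi Olcegi"]),
   ("Dikkat ve Odaklanma", some ["P2 Dikkat Testi"]),
   ("Sosyal-Duygusal Gelisim", none),
   ("Kariyer Yonelimleri", some ["Holland Mesleki Ilgi Envanteri"]),
   ("Evde Yapilabilecek Destekler", none),
   ("Profesyonel Destek Onerileri", none)]

-- B's helper _matches_required: recursion over the required list, De Morgan'd word check
def pvMatchesRequired (low : String) : List String → Bool
  | [] => false
  | req :: rest =>
    let r := PySem.Str.lower req
    if PySem.Str.isIn r low || PySem.Str.isIn low r then true
    else if !((PySem.Str.split₀ r).any (fun w =>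
                decide (PySem.Str.len w > 3) && !PySem.Str.isIn w low)) then true
    else pvMatchesRequired low rest

-- B's helper _any_test_matches
def pvAnyTestMatches (names : List String) (reqs : List String) : Bool :=
  names.any (fun name => pvMatchesRequired (PySem.Str.lower name) reqs)

def get_available_topics_alt (test_names : List String) : List (String × Bool) :=
  pvTOPIC_REQUIREMENTS.map (fun entry =>
    (entry.1,
     match entry.2 with
     | none => true
     | some reqs => pvAnyTestMatches test_names reqs))

-- ===== PRECONDITION & SPEC =====
def Spec_get_available_topics (test_names : List String) (out : List (String × Bool)) : Prop := out = get_available_topics_alt test_names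
instance (test_names : List String) (out : List (String × Bool)) : Decidable (Spec_get_available_topics test_names out) := by unfold Spec_get_available_topics; infer_instance

-- ===== CLAIM (what is proved, stated in full; the proofs are below) =====
def Claim_equal_get_available_topics : Prop := ∀ (test_names : List String), Dom_get_available_topics test_names → Spec_get_available_topics test_names (get_available_topics test_names)

-- ===== LEMMAS AND PROOFS =====

-- De Morgan: A's filtered all() over the split words equals B's negated any()
theorem pvWordAll (low : String) (ws : List String) :
    (ws.all (fun w => if PySem.Str.len w > 3 then PySem.Str.isIn w low else true))
    = !(ws.any (fun w => decide (PySem.Str.len w > 3) && !PySem.Str.isIn w low)) := by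
  induction ws with
  | nil => rfl
  | cons w rest ih =>
    simp only [List.all_cons, List.any_cons, Bool.not_or, ih]
    simp

-- B's recursive matcher computes exactly A's _test_name_matches
theorem pvMatchesRequired_eq (n : String) (reqs : List String) :
    pvMatchesRequired (PySem.Str.lower n) reqs = pvTestNameMatches n reqs := by
  induction reqs with
  | nil => rfl
  | cons req rest ih =>
    have hstep : pvMatchesRequired (PySem.Str.lower n) (req :: rest)
        = (((PySem.Str.isIn (PySem.Str.lower req) (PySem.Str.lower n)
              || PySem.Str.isIn (PySem.Str.lower n) (PySem.Str.lower req))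
            || !((PySem.Str.split₀ (PySem.Str.lower req)).any (fun w =>
                  decide (PySem.Str.len w > 3) && !PySem.Str.isIn w (PySem.Str.lower n))))
           || pvMatchesRequired (PySem.Str.lower n) rest) := by
      unfold pvMatchesRequired
      dsimp only
      split_ifs with h1 h2
      · rw [h1]; rfl
      · rw [Bool.not_eq_true] at h1
        rw [h1, h2]; rfl
      · rw [Bool.not_eq_true] at h1 h2
        rw [h1, h2, Bool.false_or, Bool.false_or, ← pvMatchesRequired.eq_def]
    have hrest : (rest.any fun r =>
        PySem.Str.isIn (PySem.Str.lower r) (PySem.Str.lower n)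
          || PySem.Str.isIn (PySem.Str.lower n) (PySem.Str.lower r)
          || (PySem.Str.split₀ (PySem.Str.lower r)).all (fun w =>
              if PySem.Str.len w > 3 then PySem.Str.isIn w (PySem.Str.lower n) else true))
        = pvTestNameMatches n rest := rfl
    rw [hstep, ih]
    conv_rhs => unfold pvTestNameMatches
    simp only [List.any_cons]
    rw [hrest, pvWordAll]

theorem pvAnyTestMatches_eq (names reqs : List String) :
    pvAnyTestMatches names reqs = names.any (fun t => pvTestNameMatches t reqs) := by
  unfold pvAnyTestMatches
  induction names with
  | nil => rfl
  | cons n rest ih => simp only [List.any_cons, pvMatchesRequired_eq]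

-- ===== VERDICT (by name: the statement is the Claim_ definition above) =====
theorem get_available_topics_spec : Claim_equal_get_available_topics := by
  intro names _
  show get_available_topics names = get_available_topics_alt names
  have hA0 : pvALWAYS_ACTIVE.contains "Genel Degerlendirme" = true := by decide
  have hA1 : pvALWAYS_ACTIVE.contains "Guclu Yonler" = true := by decide
  have hA2 : pvALWAYS_ACTIVE.contains "Gelisim Alanlari" = true := by decide
  have hA3 : pvALWAYS_ACTIVE.contains "Evde Yapilabilecek Destekler" = true := by decide
  have hA4 : pvALWAYS_ACTIVE.contains "Profesyonel Destek Onerileri" = true := by decide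
  have hA5 : pvALWAYS_ACTIVE.contains "Motivasyon ve Ilgi Alanlari" = true := by decide
  have hA6 : pvALWAYS_ACTIVE.contains "Sosyal-Duygusal Gelisim" = true := by decide
  have hN0 : pvALWAYS_ACTIVE.contains "Sinav Kaygisi Durumu" = false := by decide
  have hN1 : pvALWAYS_ACTIVE.contains "Dikkat ve Odaklanma" = false := by decide
  have hN2 : pvALWAYS_ACTIVE.contains "Kariyer Yonelimleri" = false := by decide
  have hN3 : pvALWAYS_ACTIVE.contains "Ogrenme Stili ve Tercihleri" = false := by decide
  have hN4 : pvALWAYS_ACTIVE.contains "Calisma Aliskanliklari" = false := by decide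
  have hC0 : pvTOPIC_TEST_MAP.contains "Sinav Kaygisi Durumu" = true := by decide
  have hC1 : pvTOPIC_TEST_MAP.contains "Dikkat ve Odaklanma" = true := by decide
  have hC2 : pvTOPIC_TEST_MAP.contains "Kariyer Yonelimleri" = true := by decide
  have hC3 : pvTOPIC_TEST_MAP.contains "Ogrenme Stili ve Tercihleri" = true := by decide
  have hC4 : pvTOPIC_TEST_MAP.contains "Calisma Aliskanliklari" = true := by decide
  have hG0 : pvTOPIC_TEST_MAP.getD "Sinav Kaygisi Durumu" [] = ["Sinav Kaygisi Olcegi"] := by rfl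
  have hG1 : pvTOPIC_TEST_MAP.getD "Dikkat ve Odaklanma" [] = ["P2 Dikkat Testi"] := by rfl
  have hG2 : pvTOPIC_TEST_MAP.getD "Kariyer Yonelimleri" [] = ["Holland Mesleki Ilgi Envanteri"] := by rfl
  have hG3 : pvTOPIC_TEST_MAP.getD "Ogrenme Stili ve Tercihleri" [] = ["VARK Ogrenme Stilleri Testi", "Coklu Zeka Testi", "Sag-Sol Beyin Dominansi Testi"] := by rfl
  have hG4 : pvTOPIC_TEST_MAP.getD "Calisma Aliskanliklari" [] = ["Calisma Davranisi Olcegi"] := by rfl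
  unfold get_available_topics get_available_topics_alt pvALL_TOPICS pvTOPIC_REQUIREMENTS
  simp only [List.foldl_cons, List.foldl_nil, List.map_cons, List.map_nil,
    hA0, hA1, hA2, hA3, hA4, hA5, hA6, hN0, hN1, hN2, hN3, hN4,
    hC0, hC1, hC2, hC3, hC4, hG0, hG1, hG2, hG3, hG4,
    pvAnyTestMatches_eq, if_true, if_false, Bool.false_eq_true, List.nil_append, List.cons_append]
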